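-- pv_equiv track=rewrite | github.com/nashen-netdev/ping | src/ping_tool/utils/excel_reader.py | is_green_cell
-- ===== SOURCE A (Python) =====
-- from typing import Optional, Dict, List, Tuple
--
-- def is_green_cell(style_info: Dict) -> bool:
--     """
--     判断单元格是否为绿色
--
--     Args:
--         style_info: 样式信息字典
--
--     Returns:
--         bool: 是否为绿色单元格
--     """
--     if not style_info or not style_info.get('fill_color'):
--         return False
--
--     color = style_info['fill_color'].upper()
--     # 常见的绿色值（可以根据实际情况调整）
--     green_colors = [
--         'C6EFCE',  # 浅绿色
--         '00B050',  # Excel 标准绿色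
--         '92D050',  # 亮绿色
--         'E2EFDA',  # 很浅的绿色
--         '70AD47',  # 深绿色
--     ]
--
--     # 检查是否匹配已知的绿色
--     for green in green_colors:
--         if color == green:
--             return True
--
--     # 通用绿色检测：R 分量小，G 分量大
--     try:
--         r = int(color[0:2], 16)
--         g = int(color[2:4], 16)
--         b = int(color[4:6], 16)
--         # 绿色的特征：G > R 且 G > B
--         if g > r and g > b and g > 100:
--             return True
--     except:
--         pass
--
--     return False
-- ===== SOURCE B (Python) =====
-- def is_green_cell(style_info):
--     """Green iff the fill color parses as RRGGBB hex with a dominant G component."""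
--     if not style_info or not style_info.get('fill_color'):
--         return False
--     color = style_info['fill_color'].upper()
--     try:
--         r, g, b = [int(color[i:i + 2], 16) for i in (0, 2, 4)]
--     except ValueError:
--         return False
--     return g > r and g > b and g > 100
-- ===== Notes on version B (the rewrite author's own statement) =====
-- stated objective: simpler
-- what changed: Dropped A's five-entry green_colors lookup table and its membership scan (every listed color already satisfies the generic G>R and G>B and G>100 test) and replaced the three sequential try-parses with a single comprehension over the three component offsets.
import Mathlib
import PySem

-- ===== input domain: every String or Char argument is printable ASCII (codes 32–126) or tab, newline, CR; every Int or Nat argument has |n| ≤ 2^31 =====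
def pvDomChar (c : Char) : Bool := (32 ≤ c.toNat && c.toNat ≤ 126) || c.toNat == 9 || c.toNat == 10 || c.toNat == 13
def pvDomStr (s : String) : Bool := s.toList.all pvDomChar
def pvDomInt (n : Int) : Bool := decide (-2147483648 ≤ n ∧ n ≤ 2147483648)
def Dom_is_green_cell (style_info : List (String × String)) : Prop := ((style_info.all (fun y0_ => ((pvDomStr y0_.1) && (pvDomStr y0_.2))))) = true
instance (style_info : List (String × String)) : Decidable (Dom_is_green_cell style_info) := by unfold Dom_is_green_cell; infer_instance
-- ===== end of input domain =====

-- B drops A's five-entry green lookup table and its scan (every listed color already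
-- satisfies the generic G>R ∧ G>B ∧ G>100 test) and parses the three components with one
-- comprehension over the offsets; objective: simpler, same exact behaviour.

-- ===== PORT A =====
-- transliteration of A: guard, upper, scan of the green_colors list, then the try-block
-- parsing the three slices with int(·,16) (PySem.Int.ofStrBase?; none = ValueError → except: pass)
def is_green_cell (style_info : List (String × String)) : Bool :=
  let d := PySem.Dict.mk style_info
  if style_info = [] ∨ (d.get? "fill_color").getD "" = "" then false
  else
    let color := PySem.Str.upper ((d.get? "fill_color").getD "")
    let green_colors := ["C6EFCE", "00B050", "92D050", "E2EFDA", "70AD47"]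
    -- 'for green in green_colors: if color == green: return True'
    if green_colors.any (fun green => color == green) then true
    else
      match PySem.Int.ofStrBase? (PySem.Str.slice color (some 0) (some 2)) 16 with
      | none => false
      | some r =>
        match PySem.Int.ofStrBase? (PySem.Str.slice color (some 2) (some 4)) 16 with
        | none => false
        | some g =>
          match PySem.Int.ofStrBase? (PySem.Str.slice color (some 4) (some 6)) 16 with
          | none => false
          | some b => if g > r ∧ g > b ∧ g > 100 then true else false

-- ===== PORT B =====
-- B-side helper: int(color[i:i+2], 16) for one offset (none = ValueError)
def pvHexByte? (color : String) (i : Int) : Option Int :=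
  PySem.Int.ofStrBase? (PySem.Str.slice color (some i) (some (i + 2))) 16

-- transliteration of B: guard, upper, the comprehension [int(color[i:i+2],16) for i in (0,2,4)]
-- unpacked into r, g, b (except ValueError → False), then the single predicate
def is_green_cell_alt (style_info : List (String × String)) : Bool :=
  if style_info = [] then false
  else
    match (PySem.Dict.mk style_info).get? "fill_color" with
    | none => false
    | some fc =>
      if fc = "" then false
      else
        let color := PySem.Str.upper fc
        match ([(0 : Int), 2, 4].map (fun i => pvHexByte? color i)) with
        | [some r, some g, some b] => decide (g > r ∧ g > b ∧ g > 100)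
        | _ => false

-- ===== PRECONDITION & SPEC =====
def Spec_is_green_cell (style_info : List (String × String)) (out : Bool) : Prop := out = is_green_cell_alt style_info
instance (style_info : List (String × String)) (out : Bool) : Decidable (Spec_is_green_cell style_info out) := by unfold Spec_is_green_cell; infer_instance

-- ===== CLAIM (what is proved, stated in full; the proofs are below) =====
def Claim_equal_is_green_cell : Prop := ∀ (style_info : List (String × String)), Dom_is_green_cell style_info → Spec_is_green_cell style_info (is_green_cell style_info)

-- ===== LEMMAS AND PROOFS =====

-- after the guard, A's body equals B's body for any color string
lemma body_eq (color : String) :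
    (if ["C6EFCE", "00B050", "92D050", "E2EFDA", "70AD47"].any (fun green => color == green) then true
     else
      match PySem.Int.ofStrBase? (PySem.Str.slice color (some 0) (some 2)) 16 with
      | none => false
      | some r =>
        match PySem.Int.ofStrBase? (PySem.Str.slice color (some 2) (some 4)) 16 with
        | none => false
        | some g =>
          match PySem.Int.ofStrBase? (PySem.Str.slice color (some 4) (some 6)) 16 with
          | none => false
          | some b => if g > r ∧ g > b ∧ g > 100 then true else false) =
    (match ([(0 : Int), 2, 4].map (fun i => pvHexByte? color i)) with
     | [some r, some g, some b] => decide (g > r ∧ g > b ∧ g > 100)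
     | _ => false) := by
  by_cases h1 : color = "C6EFCE"
  · subst h1; decide
  by_cases h2 : color = "00B050"
  · subst h2; decide
  by_cases h3 : color = "92D050"
  · subst h3; decide
  by_cases h4 : color = "E2EFDA"
  · subst h4; decide
  by_cases h5 : color = "70AD47"
  · subst h5; decide
  have hany : (["C6EFCE", "00B050", "92D050", "E2EFDA", "70AD47"].any (fun green => color == green)) = false := by
    simp [List.any, h1, h2, h3, h4, h5]
  rw [hany]
  simp only [List.map, pvHexByte?, Bool.false_eq_true, if_false]
  norm_num
  cases PySem.Int.ofStrBase? (PySem.Str.slice color (some 0) (some 2)) 16 with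
  | none => rfl
  | some r =>
    cases PySem.Int.ofStrBase? (PySem.Str.slice color (some 2) (some 4)) 16 with
    | none => rfl
    | some g =>
      cases PySem.Int.ofStrBase? (PySem.Str.slice color (some 4) (some 6)) 16 with
      | none => rfl
      | some b => simp


theorem is_green_cell_spec : Claim_equal_is_green_cell := by
  intro style_info _
  unfold Spec_is_green_cell is_green_cell is_green_cell_alt
  by_cases hnil : style_info = []
  · simp [hnil]
  · cases hfc : (PySem.Dict.mk style_info).get? "fill_color" with
    | none => simp [hnil, hfc]
    | some fc =>
      by_cases hempty : fc = ""
      · simp [hnil, hfc, hempty]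
      · simp only [hnil, hfc, hempty, Option.getD_some, or_self, if_neg, not_false_iff]
        exact body_eq (PySem.Str.upper fc)
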